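-- pv_equiv track=rewrite | github.com/j-petit/public_transport_map | library/graph_utils/quad_tree.py | _decode_c2i
-- ===== SOURCE A (Python) =====
-- def _decode_c2i(treecode):
--     """
--
--     :param treecode:
--     :return:
--     """
--     lat = 0
--     lon = 0
--     for i in treecode:
--         b = ord(i) - 48
--         lat = (lat << 1) + int(b / 2)
--         lon = (lon << 1) + b % 2
--
--     return (lat, lon, len(treecode))
-- ===== SOURCE B (Python) =====
-- def _decode_c2i(treecode):
--     digits = [ord(c) - 48 for c in treecode]
--     L = len(digits)
--     lat = sum(int(b / 2) << (L - 1 - i) for i, b in enumerate(digits))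
--     lon = sum((b % 2) << (L - 1 - i) for i, b in enumerate(digits))
--     return (lat, lon, L)
-- ===== Notes on version B (the rewrite author's own statement) =====
-- stated objective: alternative
-- what changed: Replaces the incremental shift-and-accumulate loop over the string with a digit list built once and two place-value summations (sum of digit-part << (L-1-i) over enumerate), i.e. positional weighting instead of carried accumulator state.
import Mathlib
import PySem

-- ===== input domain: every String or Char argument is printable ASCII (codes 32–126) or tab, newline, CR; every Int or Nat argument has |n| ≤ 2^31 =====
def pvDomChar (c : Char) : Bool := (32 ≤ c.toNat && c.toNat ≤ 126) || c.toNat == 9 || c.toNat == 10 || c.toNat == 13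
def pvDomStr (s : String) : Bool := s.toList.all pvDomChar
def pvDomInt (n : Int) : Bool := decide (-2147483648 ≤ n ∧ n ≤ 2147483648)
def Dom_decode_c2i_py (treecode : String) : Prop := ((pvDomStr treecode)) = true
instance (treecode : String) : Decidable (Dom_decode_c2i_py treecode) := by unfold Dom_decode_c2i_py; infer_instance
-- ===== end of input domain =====

-- B replaces A's shift-and-accumulate loop by two place-value summations over an enumerated
-- digit list (alternative decomposition, same cost); return values agree on all inputs.

-- ===== PORT A =====
-- loop body: b = ord(i) - 48; lat = (lat << 1) + int(b/2); lon = (lon << 1) + b % 2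
-- (int(b/2) is truncating division = PySem.Int.truncdiv, exact here; b % 2 = PySem.Int.mod)
def decode_c2i_py (treecode : String) : Int × Int × Int :=
  let s := treecode.toList.foldl
    (fun (s : Int × Int) (i : Char) =>
      ((s.1 <<< (1:Nat)) + PySem.Int.truncdiv ((i.toNat : Int) - 48) 2,
       (s.2 <<< (1:Nat)) + PySem.Int.mod ((i.toNat : Int) - 48) 2))
    (0, 0)
  (s.1, s.2, (PySem.Str.len treecode : Int))

-- ===== PORT B =====
def decode_c2i_py_alt (treecode : String) : Int × Int × Int :=
  let digits : List Int := treecode.toList.map (fun c => (c.toNat : Int) - 48)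
  let L : Int := (digits.length : Int)
  let lat := (PySem.List.enumerate digits).foldl
    (fun acc p => acc + PySem.Int.truncdiv p.2 2 * 2 ^ (L - 1 - p.1).toNat) 0
  let lon := (PySem.List.enumerate digits).foldl
    (fun acc p => acc + PySem.Int.mod p.2 2 * 2 ^ (L - 1 - p.1).toNat) 0
  (lat, lon, L)

-- ===== PRECONDITION & SPEC =====
def Spec_decode_c2i_py (treecode : String) (out : Int × Int × Int) : Prop := out = decode_c2i_py_alt treecode
instance (treecode : String) (out : Int × Int × Int) : Decidable (Spec_decode_c2i_py treecode out) := by unfold Spec_decode_c2i_py; infer_instance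

-- ===== CLAIM (what is proved, stated in full; the proofs are below) =====
def Claim_equal_decode_c2i_py : Prop := ∀ (treecode : String), Dom_decode_c2i_py treecode → Spec_decode_c2i_py treecode (decode_c2i_py treecode)

-- ===== LEMMAS AND PROOFS =====

-- the place-value sum of a digit list under a digit transform g, written structurally
def pvVal (g : Int → Int) : List Int → Int
  | [] => 0
  | b :: t => g b * 2 ^ t.length + pvVal g t

-- A's pair-state shift-accumulate loop over the characters computes, in each component,
-- start · 2^len plus the place-value sum of the mapped digits
theorem pvLoopA (l : List Char) (x y : Int) :
    l.foldl
        (fun (s : Int × Int) (i : Char) =>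
          ((s.1 <<< (1:Nat)) + PySem.Int.truncdiv ((i.toNat : Int) - 48) 2,
           (s.2 <<< (1:Nat)) + PySem.Int.mod ((i.toNat : Int) - 48) 2)) (x, y) =
      (x * 2 ^ l.length + pvVal (fun b => PySem.Int.truncdiv b 2) (l.map (fun c => (c.toNat : Int) - 48)),
       y * 2 ^ l.length + pvVal (fun b => PySem.Int.mod b 2) (l.map (fun c => (c.toNat : Int) - 48))) := by
  induction l generalizing x y with
  | nil => simp [pvVal]
  | cons c t ih =>
    rw [List.foldl_cons, ih]
    simp only [List.map_cons, pvVal, List.length_cons, List.length_map, Int.shiftLeft_eq,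
      Prod.mk.injEq]
    constructor <;> ring

-- B's enumerated weighted sum computes the same place-value sum (n is the enumeration offset)
theorem pvFoldB (g : Int → Int) (l : List Int) (L : Int) (n : Int) (acc : Int)
    (h : n + l.length = L) :
    (PySem.List.enumerate l n).foldl
        (fun a p => a + g p.2 * 2 ^ (L - 1 - p.1).toNat) acc = acc + pvVal g l := by
  induction l generalizing n acc with
  | nil => simp [PySem.List.enumerate_nil, pvVal]
  | cons b t ih =>
    rw [PySem.List.enumerate_cons]
    simp only [List.foldl_cons]
    rw [ih (n + 1) _ (by push_cast [List.length_cons] at h ⊢; omega)]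
    have hw : (L - 1 - n).toNat = t.length := by
      push_cast [List.length_cons] at h; omega
    rw [hw]
    simp only [pvVal]; ring

-- pvFoldB instantiated at B's two concrete digit transforms (stated so `rw` matches the goal)
theorem pvFoldBLat (l : List Int) (L : Int) (h : (0:Int) + l.length = L) :
    (PySem.List.enumerate l 0).foldl
        (fun a p => a + PySem.Int.truncdiv p.2 2 * 2 ^ (L - 1 - p.1).toNat) 0 =
      0 + pvVal (fun b => PySem.Int.truncdiv b 2) l :=
  pvFoldB (fun b => PySem.Int.truncdiv b 2) l L 0 0 h

theorem pvFoldBLon (l : List Int) (L : Int) (h : (0:Int) + l.length = L) :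
    (PySem.List.enumerate l 0).foldl
        (fun a p => a + PySem.Int.mod p.2 2 * 2 ^ (L - 1 - p.1).toNat) 0 =
      0 + pvVal (fun b => PySem.Int.mod b 2) l :=
  pvFoldB (fun b => PySem.Int.mod b 2) l L 0 0 h

-- ===== VERDICT (by name: the statement is the Claim_ definition above) =====
theorem decode_c2i_py_spec : Claim_equal_decode_c2i_py := by
  intro treecode _
  unfold Spec_decode_c2i_py
  simp only [decode_c2i_py, decode_c2i_py_alt]
  rw [pvLoopA, pvFoldBLat _ _ (by simp), pvFoldBLon _ _ (by simp)]
  simp [PySem.Str.len_eq]
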